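-- pv_equiv track=rewrite | github.com/amantha06/Artificial-Intelligence | Unit 8/temp.py | create_new_split
-- ===== SOURCE A (Python) =====
-- def create_new_split(feat_list, feat_index, feat_type, data):
--     selected_indices = [i for i in range(len(data[feat_index])) if data[feat_index][i] == feat_type]
--     updated_feats = [feat for feat in feat_list if feat != feat_index]
--     updated_data = {}
--     for feat in feat_list:
--         if feat != feat_index:
--             updated_data[feat] = [data[feat][i] for i in selected_indices]
--
--     return updated_feats, updated_data
-- ===== SOURCE B (Python) =====
-- def create_new_split(feat_list, feat_index, feat_type, data):
--     updated_feats = [f for f in feat_list if f != feat_index]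
--     updated_data = {f: [] for f in updated_feats}
--     for i, t in enumerate(data[feat_index]):
--         if t == feat_type:
--             for f in updated_data:
--                 updated_data[f].append(data[f][i])
--     return updated_feats, updated_data
-- ===== Notes on version B (the rewrite author's own statement) =====
-- stated objective: alternative
-- what changed: Replaces A's column-major strategy (precompute matching indices, then one pass per feature extracting its whole column) by a row-major single sweep: one pass over the target column that, on each matching row, appends that row's cell to every remaining feature's accumulator at once.
import Mathlib
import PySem

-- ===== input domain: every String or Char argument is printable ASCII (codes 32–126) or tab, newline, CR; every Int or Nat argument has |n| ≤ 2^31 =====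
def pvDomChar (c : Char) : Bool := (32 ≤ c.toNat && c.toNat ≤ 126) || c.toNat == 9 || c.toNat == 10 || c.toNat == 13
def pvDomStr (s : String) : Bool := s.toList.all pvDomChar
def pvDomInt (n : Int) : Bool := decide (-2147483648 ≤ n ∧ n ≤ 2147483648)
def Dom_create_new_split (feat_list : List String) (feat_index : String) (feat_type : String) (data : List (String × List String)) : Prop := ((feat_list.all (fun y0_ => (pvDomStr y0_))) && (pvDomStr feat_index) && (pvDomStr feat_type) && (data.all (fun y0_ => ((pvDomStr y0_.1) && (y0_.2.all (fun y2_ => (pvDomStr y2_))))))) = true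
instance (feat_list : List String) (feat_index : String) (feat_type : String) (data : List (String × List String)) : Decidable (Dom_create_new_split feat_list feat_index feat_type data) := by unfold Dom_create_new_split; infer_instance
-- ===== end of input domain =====

-- B replaces A's column-major strategy (precompute matching row indices, then extract each
-- remaining feature's column in its own pass) by a row-major single sweep over the target
-- column that appends each matching row's cell to every remaining feature's accumulator;
-- same cost, same return value.


-- ===== PORT A =====
def create_new_split (feat_list : List String) (feat_index : String) (feat_type : String) (data : List (String × List String)) : List String × (List (String × List String)) :=
  let target := (PySem.Dict.mk data).getD feat_index []
  let selected_indices := (PySem.List.pyRange 0 target.length 1).filter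
    (fun i => PySem.List.pyGetD target i "" == feat_type)
  let updated_feats := feat_list.filter (fun feat => feat != feat_index)
  let updated_data := feat_list.foldl
    (fun d feat =>
      if feat != feat_index then
        d.insert feat (selected_indices.map
          (fun i => PySem.List.pyGetD ((PySem.Dict.mk data).getD feat []) i ""))
      else d)
    (PySem.Dict.mk [])
  (updated_feats, updated_data.items)

-- ===== PORT B =====
def create_new_split_alt (feat_list : List String) (feat_index : String) (feat_type : String) (data : List (String × List String)) : List String × (List (String × List String)) :=
  let updated_feats := feat_list.filter (fun f => f != feat_index)
  let d0 : PySem.Dict String (List String) :=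
    updated_feats.foldl (fun d f => d.insert f []) (PySem.Dict.mk [])
  let target := (PySem.Dict.mk data).getD feat_index []
  let updated_data := (PySem.List.enumerate target 0).foldl
    (fun d p =>
      if p.2 == feat_type then
        d.keys.foldl
          (fun d' f =>
            d'.insert f (d'.getD f [] ++
              [PySem.List.pyGetD ((PySem.Dict.mk data).getD f []) p.1 ""])) d
      else d) d0
  (updated_feats, updated_data.items)

-- ===== PRECONDITION & SPEC =====
-- Pre_ excludes exactly the inputs where Python A raises: a KeyError when feat_index is not a
-- key of data or when a kept feature is missing while some row matches, and an IndexError when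
-- a kept feature's column is shorter than some selected index of the target column.
def Pre_create_new_split (feat_list : List String) (feat_index : String) (feat_type : String) (data : List (String × List String)) : Prop :=
  (PySem.Dict.mk data).contains feat_index = true ∧
  ∀ feat ∈ feat_list, feat ≠ feat_index →
    ∀ i < ((PySem.Dict.mk data).getD feat_index []).length,
      ((PySem.Dict.mk data).getD feat_index []).getD i "" = feat_type →
      i < ((PySem.Dict.mk data).getD feat []).length
instance (feat_list : List String) (feat_index : String) (feat_type : String) (data : List (String × List String)) : Decidable (Pre_create_new_split feat_list feat_index feat_type data) := by unfold Pre_create_new_split; infer_instance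
def pvWitness_create_new_split : List String × String × String × (List (String × List String)) :=
  (["a", "b"], "a", "x", [("a", ["x", "y"]), ("b", ["u", "v"])])

def Spec_create_new_split (feat_list : List String) (feat_index : String) (feat_type : String) (data : List (String × List String)) (out : List String × (List (String × List String))) : Prop := out = create_new_split_alt feat_list feat_index feat_type data
instance (feat_list : List String) (feat_index : String) (feat_type : String) (data : List (String × List String)) (out : List String × (List (String × List String))) : Decidable (Spec_create_new_split feat_list feat_index feat_type data out) := by unfold Spec_create_new_split; infer_instance

-- ===== CLAIM (what is proved, stated in full; the proofs are below) =====
def Claim_equal_create_new_split : Prop := ∀ (feat_list : List String) (feat_index : String) (feat_type : String) (data : List (String × List String)), Dom_create_new_split feat_list feat_index feat_type data → Pre_create_new_split feat_list feat_index feat_type data → Spec_create_new_split feat_list feat_index feat_type data (create_new_split feat_list feat_index feat_type data)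

-- ===== LEMMAS AND PROOFS =====

-- fold with an if-guard over a list equals the plain fold over the filtered list
theorem foldl_filter_if {α β : Type} (p : α → Bool) (f : β → α → β) :
    ∀ (l : List α) (d : β),
      l.foldl (fun d x => if p x then f d x else d) d = (l.filter p).foldl f d := by
  intro l
  induction l with
  | nil => intro d; rfl
  | cons a l ih =>
    intro d
    simp only [List.foldl_cons, List.filter_cons]
    by_cases h : p a = true
    · simp [h, ih]
    · simp [h, ih]

-- getD of a fold of inserts whose values depend only on the key
theorem getD_foldl_insert_keyfun (v : String → List String) :
    ∀ (fs : List String) (d : PySem.Dict String (List String)) (k : String),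
      (fs.foldl (fun d f => d.insert f (v f)) d).getD k [] =
        if k ∈ fs then v k else d.getD k [] := by
  intro fs
  induction fs with
  | nil => intro d k; simp
  | cons f fs ih =>
    intro d k
    simp only [List.foldl_cons, ih, PySem.Dict.getD_insert, List.mem_cons]
    by_cases h1 : k ∈ fs
    · simp [h1]
    · by_cases h2 : k = f <;> simp [h1, h2]

-- keys of a fold of inserts are the original keys updated with the inserted keys
theorem keys_foldl_insert_keyfun (v : String → List String) (fs : List String)
    (d : PySem.Dict String (List String)) :
    (fs.foldl (fun d f => d.insert f (v f)) d).keys = PySem.Set.update d.keys fs := by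
  exact PySem.Dict.keys_foldl_insert fs (fun _ f => v f) d

-- updating a set with elements it already contains is the identity
theorem set_update_self (s : List String) (fs : List String) (h : ∀ x ∈ fs, x ∈ s) :
    PySem.Set.update s fs = s := by
  rw [PySem.Set.update_eq_append_filter]
  have : (PySem.Set.ofList fs).filter (fun y => !(PySem.Set.contains s y)) = [] := by
    rw [List.filter_eq_nil_iff]
    intro a ha
    have : a ∈ s := h a ((PySem.Set.mem_ofList fs a).mp ha)
    simp [PySem.Set.contains, this]
  rw [this, List.append_nil]

-- inner row step: appending (via insert) over a Nodup key list, pointwise effect on getD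
theorem getD_inner_step (w : String → String) :
    ∀ (ks : List String) (d : PySem.Dict String (List String)), ks.Nodup → ∀ (k : String),
      (ks.foldl (fun d' f => d'.insert f (d'.getD f [] ++ [w f])) d).getD k [] =
        if k ∈ ks then d.getD k [] ++ [w k] else d.getD k [] := by
  intro ks
  induction ks with
  | nil => intro d _ k; simp
  | cons f ks ih =>
    intro d hnd k
    have hnd' := hnd
    rw [List.nodup_cons] at hnd'
    simp only [List.foldl_cons, ih _ hnd'.2, PySem.Dict.getD_insert, List.mem_cons]
    by_cases h1 : k ∈ ks
    · have : k ≠ f := fun he => hnd'.1 (he ▸ h1)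
      simp [h1, this]
    · by_cases h2 : k = f
      · simp [h2, hnd'.1]
      · simp [h1, h2]

-- keys are unchanged by an inner row step
theorem keys_inner_step (w : String → String) (ks : List String)
    (d : PySem.Dict String (List String)) (h : ∀ x ∈ ks, x ∈ d.keys) :
    (ks.foldl (fun d' f => d'.insert f (d'.getD f [] ++ [w f])) d).keys = d.keys := by
  rw [PySem.Dict.keys_foldl_insert ks (fun d' f => d'.getD f [] ++ [w f]) d]
  exact set_update_self _ _ h

-- row-fold invariant: keys fixed, each key's value extended by the matching rows' cells
theorem rowfold_invariant (ft : String) (g : String → Int → String) :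
    ∀ (rows : List (Int × String)) (d : PySem.Dict String (List String)), d.keys.Nodup →
      (rows.foldl
        (fun d p =>
          if p.2 == ft then
            d.keys.foldl (fun d' f => d'.insert f (d'.getD f [] ++ [g f p.1])) d
          else d) d).keys = d.keys ∧
      ∀ k : String,
        (rows.foldl
          (fun d p =>
            if p.2 == ft then
              d.keys.foldl (fun d' f => d'.insert f (d'.getD f [] ++ [g f p.1])) d
            else d) d).getD k [] =
          d.getD k [] ++
            (if k ∈ d.keys then (rows.filter (fun p => p.2 == ft)).map (fun p => g k p.1) else []) := by
  intro rows
  induction rows with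
  | nil => intro d _; constructor
           · rfl
           · intro k; by_cases h : k ∈ d.keys <;> simp [h]
  | cons r rows ih =>
    intro d hnd
    by_cases hr : (r.2 == ft) = true
    · have hkeys : (d.keys.foldl (fun d' f => d'.insert f (d'.getD f [] ++ [g f r.1])) d).keys = d.keys :=
        keys_inner_step _ _ _ (fun x hx => hx)
      have hnd1 : (d.keys.foldl (fun d' f => d'.insert f (d'.getD f [] ++ [g f r.1])) d).keys.Nodup := by
        rw [hkeys]; exact hnd
      obtain ⟨ihk, ihv⟩ := ih _ hnd1
      constructor
      · rw [List.foldl_cons, if_pos hr, ihk, hkeys]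
      · intro k
        rw [List.foldl_cons, if_pos hr, ihv k, hkeys, getD_inner_step _ _ _ hnd,
          List.filter_cons]
        by_cases h : k ∈ d.keys
        · simp [h, hr, List.append_assoc]
        · simp [h]
    · obtain ⟨ihk, ihv⟩ := ih d hnd
      constructor
      · rw [List.foldl_cons, if_neg hr, ihk]
      · intro k
        rw [List.foldl_cons, if_neg hr, ihv k, List.filter_cons]
        simp [hr]

-- the per-column lists produced by the two strategies coincide
theorem column_eq (target col : List String) (ft : String) :
    ((PySem.List.pyRange 0 target.length 1).filter
        (fun i => PySem.List.pyGetD target i "" == ft)).map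
      (fun i => PySem.List.pyGetD col i "") =
    (((PySem.List.enumerate target 0).filter (fun p => p.2 == ft)).map
      (fun p => PySem.List.pyGetD col p.1 "")) := by
  rw [PySem.List.enumerate_eq_map_pyRange target ""]
  rw [List.filter_map, List.map_map]
  rfl

-- ===== VERDICT (by name: the statement is the Claim_ definition above) =====
theorem create_new_split_spec : Claim_equal_create_new_split := by
  intro feat_list feat_index feat_type data _ _
  unfold Spec_create_new_split
  simp only [create_new_split, create_new_split_alt]
  rw [foldl_filter_if]
  set target := (PySem.Dict.mk data).getD feat_index [] with htarget
  set fs := feat_list.filter (fun feat => feat != feat_index) with hfs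
  set g : String → Int → String :=
    fun f i => PySem.List.pyGetD ((PySem.Dict.mk data).getD f []) i "" with hg
  set vA : String → List String :=
    fun f => ((PySem.List.pyRange 0 target.length 1).filter
      (fun i => PySem.List.pyGetD target i "" == feat_type)).map (fun i => g f i) with hvA
  -- A's dict
  set DA := fs.foldl (fun d f => d.insert f (vA f)) (PySem.Dict.mk ([] : List (String × List String))) with hDA
  -- B's dicts
  set d0 := fs.foldl (fun d f => d.insert f ([] : List String)) (PySem.Dict.mk ([] : List (String × List String))) with hd0
  set DB := (PySem.List.enumerate target 0).foldl
    (fun d p =>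
      if p.2 == feat_type then
        d.keys.foldl (fun d' f => d'.insert f (d'.getD f [] ++ [g f p.1])) d
      else d) d0 with hDB
  -- keys
  have hKA : DA.keys = PySem.Set.ofList fs := by
    rw [hDA, keys_foldl_insert_keyfun]
    simp [PySem.Set.update_nil_left]
  have hK0 : d0.keys = PySem.Set.ofList fs := by
    rw [hd0, keys_foldl_insert_keyfun (fun _ => [])]
    simp [PySem.Set.update_nil_left]
  have hnd0 : d0.keys.Nodup := by rw [hK0]; exact PySem.Set.nodup_ofList fs
  obtain ⟨hKB, hVB⟩ := rowfold_invariant feat_type g (PySem.List.enumerate target 0) d0 hnd0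
  have hndA : DA.keys.Nodup := by rw [hKA]; exact PySem.Set.nodup_ofList fs
  have hndB : DB.keys.Nodup := by rw [hDB, hKB]; exact hnd0
  -- items equality
  apply congrArg (fun l => (fs, l))
  rw [PySem.Dict.items_eq_map_keys DA hndA [], PySem.Dict.items_eq_map_keys DB hndB []]
  rw [hKA, hDB, hKB, hK0]
  apply List.map_congr_left
  intro k hk
  have hkfs : k ∈ fs := (PySem.Set.mem_ofList fs k).mp hk
  have hkd0 : k ∈ d0.keys := by rw [hK0]; exact hk
  have h1 : DA.getD k [] = vA k := by
    rw [hDA, getD_foldl_insert_keyfun]; simp [hkfs]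
  have h2 : d0.getD k [] = [] := by
    rw [hd0, getD_foldl_insert_keyfun (fun _ => [])]
    simp [hkfs]
  have h3 := hVB k
  rw [← hDB] at h3
  rw [h1, h3, h2, if_pos hkd0, List.nil_append]
  rw [hvA]
  simp only []
  rw [column_eq target ((PySem.Dict.mk data).getD k []) feat_type]
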